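-- pv_equiv track=rewrite | github.com/mcfunley/euler | p0109.py | checkout_combinations
-- ===== SOURCE A (Python) =====
-- def checkout_combinations(n, choices, hist):
--     if len(choices) == 0 or len(hist) == 3:
--         return
--
--     for name, v in choices.items():
--         if v == n:
--             yield [name] + hist
--         else:
--             for c in checkout_combinations(n - v, choices, [name] + hist):
--                 yield c
-- ===== SOURCE B (Python) =====
-- def checkout_combinations(n, choices, hist):
--     # Explicit-stack DFS replacing the generator recursion; yields in the same order.
--     items = list(choices.items())
--     if not items or len(hist) == 3:
--         return
--     stack = [(n, hist, items)]
--     while stack: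
--         cn, ch, todo = stack.pop()
--         if not todo:
--             continue
--         (name, v), todo = todo[0], todo[1:]
--         stack.append((cn, ch, todo))
--         if v == cn:
--             yield [name] + ch
--         else:
--             nh = [name] + ch
--             if len(nh) != 3:
--                 stack.append((cn - v, nh, items))
-- ===== Notes on version B (the rewrite author's own statement) =====
-- stated objective: alternative
-- what changed: The generator recursion is replaced by an explicit manual DFS over a stack of (remaining total, history, pending choices) frames, producing results in the same order with no recursion.
import Mathlib
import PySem

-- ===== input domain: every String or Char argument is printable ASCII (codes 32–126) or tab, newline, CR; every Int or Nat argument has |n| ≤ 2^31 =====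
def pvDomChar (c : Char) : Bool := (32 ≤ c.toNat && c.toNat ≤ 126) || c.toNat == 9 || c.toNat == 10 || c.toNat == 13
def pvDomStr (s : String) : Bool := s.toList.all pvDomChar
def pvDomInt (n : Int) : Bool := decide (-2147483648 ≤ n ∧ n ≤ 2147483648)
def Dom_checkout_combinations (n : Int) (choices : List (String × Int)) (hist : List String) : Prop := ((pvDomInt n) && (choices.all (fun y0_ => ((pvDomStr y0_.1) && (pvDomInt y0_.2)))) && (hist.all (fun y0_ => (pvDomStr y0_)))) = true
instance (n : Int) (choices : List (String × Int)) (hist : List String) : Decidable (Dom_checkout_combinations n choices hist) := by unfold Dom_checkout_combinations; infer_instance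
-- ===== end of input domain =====

-- B replaces the generator recursion with an explicit-stack DFS that yields in the same order.

-- ===== PORT A =====
-- A's recursion deepens hist by one per call and stops only at len(hist) == 3; under
-- Pre_ (hist.length ≤ 3) the recursion depth is at most 4, so fuel 4 makes the port exact there.
def goA (fuel : Nat) (n : Int) (choices : List (String × Int)) (hist : List String) : List (List String) :=
  match fuel with
  | 0 => []
  | f + 1 =>
    if choices.length = 0 ∨ hist.length = 3 then []
    else choices.flatMap (fun p =>
      if p.2 = n then [p.1 :: hist]
      else goA f (n - p.2) choices (p.1 :: hist))

def checkout_combinations (n : Int) (choices : List (String × Int)) (hist : List String) : List (List String) :=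
  -- choices is a Python dict: decode the association list through dict semantics first
  goA 4 n (PySem.Dict.ofList choices).items hist

-- ===== PORT B =====
-- Exact number of iterations B's while-loop spends on one frame (d is the depth budget
-- 3 - hist.length); used only as the fuel of goB, which makes the while-loop total in Lean.
def cst (items : List (String × Int)) : Nat → Int → List String → List (String × Int) → Nat
  | 0, _, _, _ => 0
  | _ + 1, _, _, [] => 1
  | d + 1, n, h, (nm, v) :: t =>
    if v = n then 1 + cst items (d + 1) n h t
    else if (nm :: h).length ≠ 3 then
      1 + cst items d (n - v) (nm :: h) items + cst items (d + 1) n h t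
    else 1 + cst items (d + 1) n h t
  termination_by d _ _ todo => (d, todo.length)

-- The while-loop of B: pop a frame (cn, ch, todo); if todo is empty drop it, else take
-- its head choice, push the continuation frame and (when v ≠ cn and the new history has
-- length ≠ 3) a child frame; a hit appends [name] + ch to the output.
def goB (fuel : Nat) (items : List (String × Int))
    (stack : List (Int × List String × List (String × Int)))
    (acc : List (List String)) : List (List String) :=
  match fuel, stack with
  | 0, _ => acc
  | _ + 1, [] => acc
  | f + 1, (cn, ch, todo) :: rest =>
    match todo with
    | [] => goB f items rest acc
    | (name, v) :: todo' =>
      let rest' := (cn, ch, todo') :: rest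
      if v = cn then goB f items rest' (acc ++ [name :: ch])
      else
        let nh := name :: ch
        if nh.length ≠ 3 then goB f items ((cn - v, nh, items) :: rest') acc
        else goB f items rest' acc

def checkout_combinations_alt (n : Int) (choices : List (String × Int)) (hist : List String) : List (List String) :=
  -- choices is a Python dict: decode the association list through dict semantics first
  let items := (PySem.Dict.ofList choices).items
  if items.length = 0 ∨ hist.length = 3 then []
  else goB (cst items (3 - hist.length) n hist items) items [(n, hist, items)] []

-- ===== PRECONDITION & SPEC =====
-- Pre_ excludes hist with more than 3 entries: A's recursion then has no reachable base
-- case and on most such inputs recurses forever (RecursionError), and B's loop likewise;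
-- on the degenerate hist>3 inputs where A happens to return, that value is an accident of
-- the missing stop (A and B still agree there, but neither terminates in general).
def Pre_checkout_combinations (n : Int) (choices : List (String × Int)) (hist : List String) : Prop :=
  hist.length ≤ 3
instance (n : Int) (choices : List (String × Int)) (hist : List String) : Decidable (Pre_checkout_combinations n choices hist) := by unfold Pre_checkout_combinations; infer_instance

def pvWitness_checkout_combinations : Int × (List (String × Int)) × List String :=
  (6, [("d1", 1), ("d2", 2)], [])

def Spec_checkout_combinations (n : Int) (choices : List (String × Int)) (hist : List String) (out : List (List String)) : Prop := out = checkout_combinations_alt n choices hist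
instance (n : Int) (choices : List (String × Int)) (hist : List String) (out : List (List String)) : Decidable (Spec_checkout_combinations n choices hist out) := by unfold Spec_checkout_combinations; infer_instance

-- ===== CLAIM (what is proved, stated in full; the proofs are below) =====
def Claim_equal_checkout_combinations : Prop := ∀ (n : Int) (choices : List (String × Int)) (hist : List String), Dom_checkout_combinations n choices hist → Pre_checkout_combinations n choices hist → Spec_checkout_combinations n choices hist (checkout_combinations n choices hist)

-- ===== LEMMAS AND PROOFS =====

-- Common specification: the dart sequences reachable within d further darts.
def spc (items : List (String × Int)) : Nat → Int → List String → List (List String)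
  | 0, _, _ => []
  | d + 1, n, h => items.flatMap (fun p =>
      if p.2 = n then [p.1 :: h] else spc items d (n - p.2) (p.1 :: h))

theorem goA_eq_spc (ch : List (String × Int)) :
    ∀ (d f : Nat) (n : Int) (h : List String),
      h.length + d = 3 → d < f → goA f n ch h = spc ch d n h := by
  intro d
  induction d with
  | zero =>
    intro f n h hl hf
    match f, hf with
    | f + 1, _ => simp [goA, spc]; intro _; omega
  | succ d ih =>
    intro f n h hl hf
    match f, hf with
    | f + 1, hf =>
      have hne : ¬ (h.length = 3) := by omega
      by_cases hch : ch.length = 0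
      · have : ch = [] := List.length_eq_zero_iff.mp hch
        subst this; simp [goA, spc]
      · simp only [goA, spc, hch, hne, or_self, if_false]
        congr 1
        funext p
        by_cases hv : p.2 = n
        · simp [hv]
        · simp only [hv, if_false]
          exact ih f (n - p.2) (p.1 :: h) (by simp; omega) (by omega)

theorem goB_run (items : List (String × Int)) :
    ∀ (d : Nat) (todo : List (String × Int)) (n : Int) (h : List String)
      (rest : List (Int × List String × List (String × Int)))
      (acc : List (List String)) (f : Nat),
      h.length + (d + 1) = 3 →
      goB (cst items (d + 1) n h todo + f) items ((n, h, todo) :: rest) acc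
        = goB f items rest (acc ++ todo.flatMap (fun p =>
            if p.2 = n then [p.1 :: h] else spc items d (n - p.2) (p.1 :: h))) := by
  intro d
  induction d with
  | zero =>
    intro todo
    induction todo with
    | nil =>
      intro n h rest acc f hl
      simp only [cst]
      rw [Nat.add_comm 1 f]
      simp [goB]
    | cons p t iht =>
      intro n h rest acc f hl
      obtain ⟨nm, v⟩ := p
      by_cases hv : v = n
      · have hc : cst items (0 + 1) n h ((nm, v) :: t) = 1 + cst items (0 + 1) n h t := by
          simp [cst, hv]
        rw [hc, show 1 + cst items (0 + 1) n h t + f = (cst items (0 + 1) n h t + f) + 1 from by omega]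
        have hg : goB ((cst items (0 + 1) n h t + f) + 1) items ((n, h, (nm, v) :: t) :: rest) acc
            = goB (cst items (0 + 1) n h t + f) items ((n, h, t) :: rest) (acc ++ [nm :: h]) := by
          simp [goB, hv]
        rw [hg, iht n h rest (acc ++ [nm :: h]) f hl]
        simp [hv]
      · have h3 : ¬ (nm :: h).length ≠ 3 := by simp; omega
        have hc : cst items (0 + 1) n h ((nm, v) :: t) = 1 + cst items (0 + 1) n h t := by
          simp only [cst, if_neg hv, if_neg h3]
        rw [hc, show 1 + cst items (0 + 1) n h t + f = (cst items (0 + 1) n h t + f) + 1 from by omega]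
        have hg : goB ((cst items (0 + 1) n h t + f) + 1) items ((n, h, (nm, v) :: t) :: rest) acc
            = goB (cst items (0 + 1) n h t + f) items ((n, h, t) :: rest) acc := by
          simp only [goB, if_neg hv, if_neg h3]
        rw [hg, iht n h rest acc f hl]
        simp [hv, spc]
  | succ d ihd =>
    intro todo
    induction todo with
    | nil =>
      intro n h rest acc f hl
      simp only [cst]
      rw [Nat.add_comm 1 f]
      simp [goB]
    | cons p t iht =>
      intro n h rest acc f hl
      obtain ⟨nm, v⟩ := p
      by_cases hv : v = n
      · have hc : cst items (d + 1 + 1) n h ((nm, v) :: t) = 1 + cst items (d + 1 + 1) n h t := by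
          simp [cst, hv]
        rw [hc, show 1 + cst items (d + 1 + 1) n h t + f = (cst items (d + 1 + 1) n h t + f) + 1 from by omega]
        have hg : goB ((cst items (d + 1 + 1) n h t + f) + 1) items ((n, h, (nm, v) :: t) :: rest) acc
            = goB (cst items (d + 1 + 1) n h t + f) items ((n, h, t) :: rest) (acc ++ [nm :: h]) := by
          simp [goB, hv]
        rw [hg, iht n h rest (acc ++ [nm :: h]) f hl]
        simp [hv]
      · have h3 : (nm :: h).length ≠ 3 := by simp; omega
        have hc : cst items (d + 1 + 1) n h ((nm, v) :: t)
            = 1 + cst items (d + 1) (n - v) (nm :: h) items + cst items (d + 1 + 1) n h t := by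
          simp only [cst, if_neg hv, if_pos h3]
        rw [hc, show 1 + cst items (d + 1) (n - v) (nm :: h) items + cst items (d + 1 + 1) n h t + f
              = (cst items (d + 1) (n - v) (nm :: h) items + (cst items (d + 1 + 1) n h t + f)) + 1 from by omega]
        have hg : goB ((cst items (d + 1) (n - v) (nm :: h) items + (cst items (d + 1 + 1) n h t + f)) + 1)
              items ((n, h, (nm, v) :: t) :: rest) acc
            = goB (cst items (d + 1) (n - v) (nm :: h) items + (cst items (d + 1 + 1) n h t + f))
              items ((n - v, nm :: h, items) :: (n, h, t) :: rest) acc := by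
          simp only [goB, if_neg hv, if_pos h3]
        rw [hg,
          ihd items (n - v) (nm :: h) ((n, h, t) :: rest) acc (cst items (d + 1 + 1) n h t + f) (by simp; omega),
          iht n h rest (acc ++ items.flatMap (fun p =>
            if p.2 = n - v then [p.1 :: nm :: h] else spc items d (n - v - p.2) (p.1 :: nm :: h))) f hl]
        simp [hv, spc]

-- ===== VERDICT (by name: the statement is the Claim_ definition above) =====
theorem checkout_combinations_spec : Claim_equal_checkout_combinations := by
  intro n choices hist _ hpre
  have hp : hist.length ≤ 3 := hpre
  unfold Spec_checkout_combinations checkout_combinations checkout_combinations_alt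
  set items := (PySem.Dict.ofList choices).items with hitems
  by_cases htop : items.length = 0 ∨ hist.length = 3
  · rw [if_pos htop]
    simp only [goA, if_pos htop]
  · rw [if_neg htop]
    have h3 : hist.length ≠ 3 := fun hx => htop (Or.inr hx)
    have hd : 3 - hist.length = (2 - hist.length) + 1 := by omega
    rw [hd]
    have hrun := goB_run items (2 - hist.length) items n hist [] [] 0 (by omega)
    rw [Nat.add_zero] at hrun
    rw [hrun]
    rw [goA_eq_spc items ((2 - hist.length) + 1) 4 n hist (by omega) (by omega)]
    simp [goB, spc]
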